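-- pv_equiv track=rewrite | github.com/android-aal-study/empirical-artifacts | rq1/analyze_removed_api.py | _java_to_jni
-- ===== SOURCE A (Python) =====
-- def _java_to_jni(c):
--     if c == 'boolean':
--         return 'Z'
--     elif c == 'byte':
--         return 'B'
--     elif c == 'char':
--         return 'C'
--     elif c == 'short':
--         return 'S'
--     elif c == 'int':
--         return 'I'
--     elif c == 'long':
--         return 'J'
--     elif c == 'float':
--         return 'F'
--     elif c == 'double':
--         return 'D'
--     elif c == 'void':
--         return 'V'
--     elif c.endswith('[]'):
--         return '[' + _java_to_jni(c[:-2])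
--     else:
--         return 'L' + c.replace('.', '/') + ';'
-- ===== SOURCE B (Python) =====
-- _PRIMS = {'boolean': 'Z', 'byte': 'B', 'char': 'C', 'short': 'S',
--           'int': 'I', 'long': 'J', 'float': 'F', 'double': 'D', 'void': 'V'}
--
-- def _java_to_jni(c):
--     prefix = ''
--     while c.endswith('[]'):
--         prefix += '['
--         c = c[:-2]
--     base = _PRIMS.get(c)
--     if base is None:
--         base = 'L' + c.replace('.', '/') + ';'
--     return prefix + base
-- ===== Notes on version B (the rewrite author's own statement) =====
-- stated objective: idiomatic
-- what changed: The self-recursion that strips one array-suffix per call is replaced by an iterative while-loop accumulating the bracket prefix, and the nine-way if/elif chain over primitive names by a single dict lookup with a class-descriptor fallback.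
import Mathlib
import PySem

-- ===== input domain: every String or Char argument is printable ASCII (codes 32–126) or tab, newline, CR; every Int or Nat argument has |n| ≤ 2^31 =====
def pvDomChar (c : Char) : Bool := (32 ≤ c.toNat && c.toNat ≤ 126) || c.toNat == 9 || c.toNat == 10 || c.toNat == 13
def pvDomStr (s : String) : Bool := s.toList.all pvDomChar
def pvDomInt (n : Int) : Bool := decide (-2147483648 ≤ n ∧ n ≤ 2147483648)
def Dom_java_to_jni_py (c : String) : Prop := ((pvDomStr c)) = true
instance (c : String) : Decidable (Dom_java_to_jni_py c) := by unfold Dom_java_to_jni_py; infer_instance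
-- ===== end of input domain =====

-- B replaces A's self-recursion over array suffixes by an iterative prefix-accumulating
-- loop and A's nine-way if/elif chain by a single dict lookup (objective: idiomatic).

-- ===== PORT A =====
-- A strips one '[]' per recursive call; c[:-2] keeps the list strictly shorter.
theorem pvSliceNeg2_len_lt (cs : List Char)
    (h : PySem.Chars.endswith cs ['[', ']'] = true) :
    (PySem.List.slice cs none (some (-2))).length < cs.length := by
  obtain ⟨t, rfl⟩ := (PySem.Chars.endswith_iff cs _).mp h
  rw [show PySem.List.slice (t ++ ['[', ']']) none (some (-2)) = t by
    rw [PySem.List.slice]; simp]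
  simp

def jniARec (cs : List Char) : List Char :=
  if cs = "boolean".toList then "Z".toList
  else if cs = "byte".toList then "B".toList
  else if cs = "char".toList then "C".toList
  else if cs = "short".toList then "S".toList
  else if cs = "int".toList then "I".toList
  else if cs = "long".toList then "J".toList
  else if cs = "float".toList then "F".toList
  else if cs = "double".toList then "D".toList
  else if cs = "void".toList then "V".toList
  else if h : PySem.Chars.endswith cs ['[', ']'] = true then
    '[' :: jniARec (PySem.List.slice cs none (some (-2)))
  else
    'L' :: (PySem.Chars.replace cs ['.'] ['/'] ++ [';'])
termination_by cs.length
decreasing_by exact pvSliceNeg2_len_lt cs h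

def java_to_jni_py (c : String) : String := String.ofList (jniARec c.toList)

-- ===== PORT B =====
def jniPrims : PySem.Dict (List Char) (List Char) :=
  PySem.Dict.ofList
    [("boolean".toList, "Z".toList), ("byte".toList, "B".toList),
     ("char".toList, "C".toList), ("short".toList, "S".toList),
     ("int".toList, "I".toList), ("long".toList, "J".toList),
     ("float".toList, "F".toList), ("double".toList, "D".toList),
     ("void".toList, "V".toList)]

def jniAltLoop (cs : List Char) (pre : List Char) : List Char :=
  if h : PySem.Chars.endswith cs ['[', ']'] = true then
    jniAltLoop (PySem.List.slice cs none (some (-2))) (pre ++ ['['])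
  else
    pre ++ (match jniPrims.get? cs with
      | some b => b
      | none => 'L' :: (PySem.Chars.replace cs ['.'] ['/'] ++ [';']))
termination_by cs.length
decreasing_by exact pvSliceNeg2_len_lt cs h

def java_to_jni_py_alt (c : String) : String := String.ofList (jniAltLoop c.toList [])

-- ===== PRECONDITION & SPEC =====
def Spec_java_to_jni_py (c : String) (out : String) : Prop := out = java_to_jni_py_alt c
instance (c : String) (out : String) : Decidable (Spec_java_to_jni_py c out) := by unfold Spec_java_to_jni_py; infer_instance

-- ===== CLAIM (what is proved, stated in full; the proofs are below) =====
def Claim_equal_java_to_jni_py : Prop := ∀ (c : String), Dom_java_to_jni_py c → Spec_java_to_jni_py c (java_to_jni_py c)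

-- ===== LEMMAS AND PROOFS =====

-- When the base case is reached, B's dict lookup agrees with A's if/elif chain.
theorem jniBase_eq (cs : List Char) :
    (match jniPrims.get? cs with
      | some b => b
      | none => 'L' :: (PySem.Chars.replace cs ['.'] ['/'] ++ [';'])) =
    (if cs = "boolean".toList then "Z".toList
      else if cs = "byte".toList then "B".toList
      else if cs = "char".toList then "C".toList
      else if cs = "short".toList then "S".toList
      else if cs = "int".toList then "I".toList
      else if cs = "long".toList then "J".toList
      else if cs = "float".toList then "F".toList
      else if cs = "double".toList then "D".toList
      else if cs = "void".toList then "V".toList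
      else 'L' :: (PySem.Chars.replace cs ['.'] ['/'] ++ [';'])) := by
  split_ifs with h1 h2 h3 h4 h5 h6 h7 h8 h9
  case _ => subst h1; decide
  case _ => subst h2; decide
  case _ => subst h3; decide
  case _ => subst h4; decide
  case _ => subst h5; decide
  case _ => subst h6; decide
  case _ => subst h7; decide
  case _ => subst h8; decide
  case _ => subst h9; decide
  case _ =>
    have hit : jniPrims.items =
        [("boolean".toList, "Z".toList), ("byte".toList, "B".toList),
         ("char".toList, "C".toList), ("short".toList, "S".toList),
         ("int".toList, "I".toList), ("long".toList, "J".toList),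
         ("float".toList, "F".toList), ("double".toList, "D".toList),
         ("void".toList, "V".toList)] := by decide
    have hnone : jniPrims.get? cs = none := by
      simp only [PySem.Dict.get?, hit]
      simp
      exact ⟨fun e => h1 e.symm, fun e => h2 e.symm, fun e => h3 e.symm,
             fun e => h4 e.symm, fun e => h5 e.symm, fun e => h6 e.symm,
             fun e => h7 e.symm, fun e => h8 e.symm, fun e => h9 e.symm⟩
    rw [hnone]

-- On an array type, A's recursion takes exactly the endswith branch.
theorem jniARec_array (cs : List Char)
    (h : PySem.Chars.endswith cs ['[', ']'] = true) :
    jniARec cs = '[' :: jniARec (PySem.List.slice cs none (some (-2))) := by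
  obtain ⟨t, rfl⟩ := (PySem.Chars.endswith_iff cs _).mp h
  have hne : ∀ (l : List Char), l.getLast? ≠ some ']' → ¬ (t ++ ['[', ']'] = l) :=
    fun l hl e => hl (by rw [← e]; simp)
  rw [jniARec, if_neg (hne _ (by decide)), if_neg (hne _ (by decide)),
    if_neg (hne _ (by decide)), if_neg (hne _ (by decide)), if_neg (hne _ (by decide)),
    if_neg (hne _ (by decide)), if_neg (hne _ (by decide)), if_neg (hne _ (by decide)),
    if_neg (hne _ (by decide)), dif_pos h]

-- The loop invariant: B's accumulator-passing loop computes pre ++ (A's recursion).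
theorem jniAltLoop_eq (cs pre : List Char) : jniAltLoop cs pre = pre ++ jniARec cs := by
  induction cs, pre using jniAltLoop.induct with
  | case1 cs pre h ih =>
    rw [jniAltLoop, dif_pos h, ih, jniARec_array cs h]
    simp
  | case2 cs pre h =>
    rw [jniAltLoop, dif_neg h, jniBase_eq cs, jniARec, dif_neg h]

-- ===== VERDICT (by name: the statement is the Claim_ definition above) =====
theorem java_to_jni_py_spec : Claim_equal_java_to_jni_py := by
  intro c _
  unfold Spec_java_to_jni_py java_to_jni_py java_to_jni_py_alt
  rw [jniAltLoop_eq]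
  simp
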